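-- pv_equiv track=rewrite | github.com/miliar/Code_Jam_Webscraper | Solutions_python/Problem_96/1627.py | highest
-- ===== SOURCE A (Python) =====
-- def highest(score):
-- 	normal,surprising = [],[]
--
-- 	for i in range(11):
-- 		for j in range(11):
-- 			for k in range(11):
-- 				if i+j+k == int(score) and abs(i-j)<2 and abs(i-k)<2 and abs(j-k)<2: normal.append((i,j,k))
-- 				elif i+j+k == int(score) and abs(i-j)<3 and abs(i-k)<3 and abs(j-k)<3: surprising.append((i,j,k))
--
-- 	maxScoreNormal = 0,-1
-- 	for i in range(len(normal)):
-- 		mMax = max(normal[i]),i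
-- 		if mMax[0]>maxScoreNormal[0]: maxScoreNormal = mMax
--
-- 	maxScoreSurprising = 0,-1
-- 	for i in range(len(surprising)):
-- 		mMax = max(surprising[i]),i
-- 		if mMax[0]>maxScoreSurprising[0]: maxScoreSurprising = mMax
--
-- 	tScore = [0,0]
-- 	if len(normal) > 0: tScore[0] = max(normal[maxScoreNormal[1]])
-- 	if len(surprising) > 0: tScore[1] = max(surprising[maxScoreSurprising[1]])
-- 	return tScore
-- ===== SOURCE B (Python) =====
-- def highest(score):
--     s = int(score)
--     best_normal = 0
--     best_surprising = 0
--     for i in range(11):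
--         for j in range(11):
--             for k in range(11):
--                 if i + j + k == s:
--                     m = max(i, j, k)
--                     if abs(i - j) < 2 and abs(i - k) < 2 and abs(j - k) < 2:
--                         if m > best_normal:
--                             best_normal = m
--                     elif abs(i - j) < 3 and abs(i - k) < 3 and abs(j - k) < 3:
--                         if m > best_surprising:
--                             best_surprising = m
--     return [best_normal, best_surprising]
-- ===== Notes on version B (the rewrite author's own statement) =====
-- stated objective: simpler
-- what changed: B fuses everything into one pass: instead of building normal/surprising triple lists and then rescanning each list twice (argmax pass plus final lookup), it keeps just two running maxima updated inside the triple loop and returns them.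
import Mathlib
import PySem

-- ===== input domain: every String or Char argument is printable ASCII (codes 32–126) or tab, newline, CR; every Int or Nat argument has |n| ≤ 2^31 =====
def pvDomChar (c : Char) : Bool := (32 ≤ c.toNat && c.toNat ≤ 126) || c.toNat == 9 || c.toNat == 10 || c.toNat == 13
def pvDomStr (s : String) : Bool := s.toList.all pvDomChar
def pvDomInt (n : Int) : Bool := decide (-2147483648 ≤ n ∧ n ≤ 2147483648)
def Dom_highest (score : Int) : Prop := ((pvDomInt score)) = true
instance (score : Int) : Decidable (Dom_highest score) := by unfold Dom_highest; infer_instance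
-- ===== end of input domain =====

-- B replaces A's build-lists-then-rescan structure with a single fused pass keeping two running maxima (objective: simpler).

-- ===== PORT A =====
-- max of a Python 3-tuple
def pvTMax (t : Int × Int × Int) : Int := max t.1 (max t.2.1 t.2.2)

def highest (score : Int) : List Int :=
  let ns : List (Int × Int × Int) × List (Int × Int × Int) :=
    (PySem.List.pyRange 0 11 1).foldl (fun st i =>
      (PySem.List.pyRange 0 11 1).foldl (fun st j =>
        (PySem.List.pyRange 0 11 1).foldl (fun st k =>
          if i + j + k = score ∧ |i - j| < 2 ∧ |i - k| < 2 ∧ |j - k| < 2 then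
            (st.1 ++ [(i, j, k)], st.2)
          else if i + j + k = score ∧ |i - j| < 3 ∧ |i - k| < 3 ∧ |j - k| < 3 then
            (st.1, st.2 ++ [(i, j, k)])
          else st) st) st) ([], [])
  let normal := ns.1
  let surprising := ns.2
  -- the indexing below is always in range: i from range(len(..)), and the final
  -- lookup is guarded by len > 0 (index -1 wraps to the last element, as in Python)
  let maxScoreNormal : Int × Int :=
    (PySem.List.pyRange 0 (normal.length) 1).foldl (fun acc i =>
      let mMax : Int × Int := (pvTMax ((PySem.List.pyGet? normal i).getD (0, 0, 0)), i)
      if mMax.1 > acc.1 then mMax else acc) (0, -1)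
  let maxScoreSurprising : Int × Int :=
    (PySem.List.pyRange 0 (surprising.length) 1).foldl (fun acc i =>
      let mMax : Int × Int := (pvTMax ((PySem.List.pyGet? surprising i).getD (0, 0, 0)), i)
      if mMax.1 > acc.1 then mMax else acc) (0, -1)
  let t0 : Int := if normal.length > 0 then
    pvTMax ((PySem.List.pyGet? normal maxScoreNormal.2).getD (0, 0, 0)) else 0
  let t1 : Int := if surprising.length > 0 then
    pvTMax ((PySem.List.pyGet? surprising maxScoreSurprising.2).getD (0, 0, 0)) else 0
  [t0, t1]

-- ===== PORT B =====
def highest_alt (score : Int) : List Int :=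
  let p : Int × Int :=
    (PySem.List.pyRange 0 11 1).foldl (fun st i =>
      (PySem.List.pyRange 0 11 1).foldl (fun st j =>
        (PySem.List.pyRange 0 11 1).foldl (fun st k =>
          if i + j + k = score then
            let m := max i (max j k)
            if |i - j| < 2 ∧ |i - k| < 2 ∧ |j - k| < 2 then
              (if m > st.1 then (m, st.2) else st)
            else if |i - j| < 3 ∧ |i - k| < 3 ∧ |j - k| < 3 then
              (if m > st.2 then (st.1, m) else st)
            else st
          else st) st) st) (0, 0)
  [p.1, p.2]

-- ===== PRECONDITION & SPEC =====
def Spec_highest (score : Int) (out : List Int) : Prop := out = highest_alt score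
instance (score : Int) (out : List Int) : Decidable (Spec_highest score out) := by unfold Spec_highest; infer_instance

-- ===== CLAIM (what is proved, stated in full; the proofs are below) =====
def Claim_equal_highest : Prop := ∀ (score : Int), Dom_highest score → Spec_highest score (highest score)

-- ===== LEMMAS AND PROOFS =====

theorem pv_foldl_id {α β : Type} (f : β → α → β) (l : List α) (init : β)
    (h : ∀ x ∈ l, ∀ s, f s x = s) : l.foldl f init = init := by
  induction l generalizing init with
  | nil => rfl
  | cons x xs ih =>
    simp only [List.foldl_cons, h x (by simp)]
    exact ih _ (fun y hy s => h y (by simp [hy]) s)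

theorem pv_range11_bound : ∀ x ∈ PySem.List.pyRange 0 11 1, 0 ≤ x ∧ x ≤ 10 := by decide

theorem pv_A_out (score : Int) (h : score < 0 ∨ 30 < score) : highest score = [0, 0] := by
  unfold highest
  have hns : ((PySem.List.pyRange 0 11 1).foldl (fun st i =>
      (PySem.List.pyRange 0 11 1).foldl (fun st j =>
        (PySem.List.pyRange 0 11 1).foldl (fun st k =>
          if i + j + k = score ∧ |i - j| < 2 ∧ |i - k| < 2 ∧ |j - k| < 2 then
            (st.1 ++ [(i, j, k)], st.2)
          else if i + j + k = score ∧ |i - j| < 3 ∧ |i - k| < 3 ∧ |j - k| < 3 then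
            (st.1, st.2 ++ [(i, j, k)])
          else st) st) st)
      (([], []) : List (Int × Int × Int) × List (Int × Int × Int)))
      = ([], []) := by
    apply pv_foldl_id
    intro i hi s
    apply pv_foldl_id
    intro j hj s
    apply pv_foldl_id
    intro k hk s
    have hib := pv_range11_bound i hi
    have hjb := pv_range11_bound j hj
    have hkb := pv_range11_bound k hk
    have hne : ¬ i + j + k = score := by omega
    simp [hne]
  simp only [hns]
  rfl

theorem pv_B_out (score : Int) (h : score < 0 ∨ 30 < score) : highest_alt score = [0, 0] := by
  unfold highest_alt
  have hp : ((PySem.List.pyRange 0 11 1).foldl (fun st i =>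
      (PySem.List.pyRange 0 11 1).foldl (fun st j =>
        (PySem.List.pyRange 0 11 1).foldl (fun st k =>
          if i + j + k = score then
            let m := max i (max j k)
            if |i - j| < 2 ∧ |i - k| < 2 ∧ |j - k| < 2 then
              (if m > st.1 then (m, st.2) else st)
            else if |i - j| < 3 ∧ |i - k| < 3 ∧ |j - k| < 3 then
              (if m > st.2 then (st.1, m) else st)
            else st
          else st) st) st) ((0, 0) : Int × Int)) = (0, 0) := by
    apply pv_foldl_id
    intro i hi s
    apply pv_foldl_id
    intro j hj s
    apply pv_foldl_id
    intro k hk s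
    have hib := pv_range11_bound i hi
    have hjb := pv_range11_bound j hj
    have hkb := pv_range11_bound k hk
    have hne : ¬ i + j + k = score := by omega
    simp [hne]
  simp only [hp]

-- ===== VERDICT (by name: the statement is the Claim_ definition above) =====
set_option maxRecDepth 10000 in
theorem highest_spec : Claim_equal_highest := by
  intro score _
  unfold Spec_highest
  by_cases hlo : 0 ≤ score
  · by_cases hhi : score ≤ 30
    · interval_cases score <;> decide
    · rw [pv_A_out score (Or.inr (by omega)), pv_B_out score (Or.inr (by omega))]
  · rw [pv_A_out score (Or.inl (by omega)), pv_B_out score (Or.inl (by omega))]
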